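-- pv_equiv track=rewrite | github.com/modelscope/evalscope | evalscope/utils/io_utils.py | get_valid_list
-- ===== SOURCE A (Python) =====
-- from typing import Any, Dict, List, Optional, Tuple, Union
--
-- def get_valid_list(
--     input_list: List[Any],
--     candidate_list: List[Any],
-- ) -> Tuple[List[Any], List[Any]]:
--     """Partition *input_list* into elements that are (or are not) in *candidate_list*.
--
--     Args:
--         input_list (List[Any]): The list to partition.
--         candidate_list (List[Any]): The reference set of valid values.
--
--     Returns:
--         Tuple[List[Any], List[Any]]: A 2-tuple of
--         ``(valid_list, invalid_list)`` where *valid_list* contains every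
--         element of *input_list* found in *candidate_list* and *invalid_list*
--         contains the rest.
--     """
--     candidate_set = set(candidate_list)
--     valid = [i for i in input_list if i in candidate_set]
--     invalid = [i for i in input_list if i not in candidate_set]
--     return valid, invalid
-- ===== SOURCE B (Python) =====
-- from typing import Any, List, Tuple
--
-- def get_valid_list(
--     input_list: List[Any],
--     candidate_list: List[Any],
-- ) -> Tuple[List[Any], List[Any]]:
--     """Divide-and-conquer partition: split the list in halves, partition each
--     half recursively, and concatenate the results. Correct because
--     partitioning distributes over concatenation and preserves order."""
--     candidate_set = set(candidate_list)
--
--     def go(lst):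
--         if len(lst) <= 1:
--             if not lst:
--                 return [], []
--             x = lst[0]
--             return ([x], []) if x in candidate_set else ([], [x])
--         mid = len(lst) // 2
--         vl, il = go(lst[:mid])
--         vr, ir = go(lst[mid:])
--         return vl + vr, il + ir
--
--     return go(input_list)
-- ===== Notes on version B (the rewrite author's own statement) =====
-- stated objective: alternative
-- what changed: Replaces A's two linear comprehension scans with a divide-and-conquer recursion that splits the list in halves, partitions each half, and concatenates the partial results.
import Mathlib
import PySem

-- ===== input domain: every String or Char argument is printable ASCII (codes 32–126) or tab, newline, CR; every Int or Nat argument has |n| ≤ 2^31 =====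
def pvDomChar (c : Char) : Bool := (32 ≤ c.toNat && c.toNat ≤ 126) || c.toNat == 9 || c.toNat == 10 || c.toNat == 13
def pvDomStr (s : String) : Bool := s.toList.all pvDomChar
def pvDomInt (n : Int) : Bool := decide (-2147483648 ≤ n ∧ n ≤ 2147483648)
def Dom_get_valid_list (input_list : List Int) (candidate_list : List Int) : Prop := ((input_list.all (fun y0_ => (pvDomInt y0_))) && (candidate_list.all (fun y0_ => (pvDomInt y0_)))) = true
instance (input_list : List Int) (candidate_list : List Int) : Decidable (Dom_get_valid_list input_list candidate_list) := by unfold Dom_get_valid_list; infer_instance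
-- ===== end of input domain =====

-- B partitions by divide-and-conquer (recursive halving) instead of A's two linear comprehension scans (alternative decomposition, same values proved below).
-- ===== PORT A =====
def get_valid_list (input_list : List Int) (candidate_list : List Int) : List Int × List Int :=
  let candidate_set : PySem.Set Int := PySem.Set.ofList candidate_list
  let valid := input_list.filter (fun i => PySem.Set.contains candidate_set i)
  let invalid := input_list.filter (fun i => !(PySem.Set.contains candidate_set i))
  (valid, invalid)

-- ===== PORT B =====
-- go: the inner recursive helper of Source B; the slices lst[:mid] / lst[mid:] with
-- 0 ≤ mid ≤ len are exactly List.take mid / List.drop mid (PySem.List.slice_to / slice_from).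
def get_valid_list_alt_go (candidate_set : PySem.Set Int) (lst : List Int) : List Int × List Int :=
  if lst.length ≤ 1 then
    match lst with
    | [] => ([], [])
    | x :: _ => if PySem.Set.contains candidate_set x then ([x], []) else ([], [x])
  else
    let mid := lst.length / 2
    let (vl, il) := get_valid_list_alt_go candidate_set (lst.take mid)
    let (vr, ir) := get_valid_list_alt_go candidate_set (lst.drop mid)
    (vl ++ vr, il ++ ir)
termination_by lst.length
decreasing_by
  · simp only [List.length_take]; omega
  · simp only [List.length_drop]; omega

def get_valid_list_alt (input_list : List Int) (candidate_list : List Int) : List Int × List Int :=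
  let candidate_set : PySem.Set Int := PySem.Set.ofList candidate_list
  get_valid_list_alt_go candidate_set input_list

-- ===== PRECONDITION & SPEC =====
def Spec_get_valid_list (input_list : List Int) (candidate_list : List Int) (out : List Int × List Int) : Prop := out = get_valid_list_alt input_list candidate_list
instance (input_list : List Int) (candidate_list : List Int) (out : List Int × List Int) : Decidable (Spec_get_valid_list input_list candidate_list out) := by unfold Spec_get_valid_list; infer_instance

-- ===== CLAIM (what is proved, stated in full; the proofs are below) =====
def Claim_equal_get_valid_list : Prop := ∀ (input_list : List Int) (candidate_list : List Int), Dom_get_valid_list input_list candidate_list → Spec_get_valid_list input_list candidate_list (get_valid_list input_list candidate_list)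

-- ===== LEMMAS AND PROOFS =====
theorem get_valid_list_alt_go_eq (cs : PySem.Set Int) (lst : List Int) :
    get_valid_list_alt_go cs lst
      = (lst.filter (fun i => PySem.Set.contains cs i),
         lst.filter (fun i => !(PySem.Set.contains cs i))) := by
  generalize hn : lst.length = n
  induction n using Nat.strong_induction_on generalizing lst with
  | _ n ih =>
    rw [get_valid_list_alt_go.eq_def]
    by_cases h : lst.length ≤ 1
    · simp only [h, if_true]
      match lst with
      | [] => simp
      | [x] => by_cases hx : x ∈ cs <;> simp [PySem.Set.contains, hx]
      | _ :: _ :: _ => simp at h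
    · simp only [h, if_false]
      have hlt1 : (lst.take (lst.length / 2)).length < n := by
        simp only [List.length_take]; omega
      have hlt2 : (lst.drop (lst.length / 2)).length < n := by
        simp only [List.length_drop]; omega
      rw [ih _ hlt1 _ rfl, ih _ hlt2 _ rfl]
      simp only []
      rw [← List.filter_append, ← List.filter_append, List.take_append_drop]

-- ===== VERDICT (by name: the statement is the Claim_ definition above) =====
theorem get_valid_list_spec : Claim_equal_get_valid_list := by
  intro input_list candidate_list _
  unfold Spec_get_valid_list get_valid_list get_valid_list_alt
  rw [get_valid_list_alt_go_eq]
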